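-- pv_equiv track=rewrite | github.com/codelion/LRMTokenEconomy | aggregate_results.py | filter_llms_by_config
-- ===== SOURCE A (Python) =====
-- from typing import Dict, List, Any, Optional
--
-- def filter_llms_by_config(detailed_evaluations: Dict[str, Any],
--                          model_config: Dict[str, Dict[str, Any]]) -> tuple[Dict[str, Any], List[str], List[str]]:
--     """Filter LLMs based on what's available in model config and return verification lists."""
--     configured_llms = set(model_config.keys())
--     found_llms = set()
--
--     # Collect all LLMs found in the evaluation data
--     for prompt_id, model_results in detailed_evaluations.items():
--         found_llms.update(model_results.keys())
--
--     # Determine included and rejected LLMs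
--     included_llms = list(found_llms.intersection(configured_llms))
--     rejected_llms = list(found_llms - configured_llms)
--
--     # Filter the detailed evaluations to only include configured LLMs
--     filtered_evaluations = {}
--     for prompt_id, model_results in detailed_evaluations.items():
--         filtered_model_results = {
--             model_name: evaluations
--             for model_name, evaluations in model_results.items()
--             if model_name in configured_llms
--         }
--         if filtered_model_results:  # Only include prompts that have results for configured models
--             filtered_evaluations[prompt_id] = filtered_model_results
--
--     return filtered_evaluations, sorted(included_llms), sorted(rejected_llms)
-- ===== SOURCE B (Python) =====
-- def filter_llms_by_config(detailed_evaluations, model_config):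
--     """Single pass over detailed_evaluations: filter prompts and classify every
--     model name as included/rejected on the fly."""
--     filtered_evaluations = {}
--     included = set()
--     rejected = set()
--     for prompt_id, model_results in detailed_evaluations.items():
--         kept = {}
--         for model_name, evaluations in model_results.items():
--             if model_name in model_config:
--                 included.add(model_name)
--                 kept[model_name] = evaluations
--             else:
--                 rejected.add(model_name)
--         if kept:
--             filtered_evaluations[prompt_id] = kept
--     return filtered_evaluations, sorted(included), sorted(rejected)
-- ===== Notes on version B (the rewrite author's own statement) =====
-- stated objective: alternative
-- what changed: Replaces A's two separate passes (one collecting all model names into a set plus set intersection/difference, one filtering the dict) by a single pass that filters each prompt and classifies every model name into included/rejected sets as it is seen.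
import Mathlib
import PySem

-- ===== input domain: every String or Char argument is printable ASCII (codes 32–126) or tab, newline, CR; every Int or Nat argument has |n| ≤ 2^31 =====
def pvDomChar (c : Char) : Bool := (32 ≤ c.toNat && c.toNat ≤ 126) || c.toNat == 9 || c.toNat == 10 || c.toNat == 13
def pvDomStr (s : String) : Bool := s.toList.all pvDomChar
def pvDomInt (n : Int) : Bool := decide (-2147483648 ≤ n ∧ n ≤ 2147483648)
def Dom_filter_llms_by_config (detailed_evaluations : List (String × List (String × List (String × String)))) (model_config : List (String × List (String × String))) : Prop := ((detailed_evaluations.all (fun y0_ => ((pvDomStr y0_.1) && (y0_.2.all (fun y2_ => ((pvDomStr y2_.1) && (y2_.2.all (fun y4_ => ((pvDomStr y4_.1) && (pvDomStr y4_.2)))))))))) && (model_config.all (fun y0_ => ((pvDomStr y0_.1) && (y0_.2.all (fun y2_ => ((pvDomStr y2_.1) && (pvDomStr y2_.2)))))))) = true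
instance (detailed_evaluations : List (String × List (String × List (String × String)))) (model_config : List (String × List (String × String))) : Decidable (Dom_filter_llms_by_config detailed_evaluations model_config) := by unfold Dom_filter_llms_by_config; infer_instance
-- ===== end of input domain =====

-- B does in ONE pass what A does in two; equivalence of return values is proved for all inputs.

-- ===== PORT A =====
-- literal transliteration of A: first loop collects all model names into found_llms,
-- set intersection/difference give included/rejected, second loop filters the dict.
def filter_llms_by_config (detailed_evaluations : List (String × List (String × List (String × String)))) (model_config : List (String × List (String × String))) : (List (String × List (String × List (String × String)))) × List String × List String :=
  let configured_llms : PySem.Set String := PySem.Set.ofList (model_config.map (·.1))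
  let found_llms : PySem.Set String :=
    detailed_evaluations.foldl (fun s pr => PySem.Set.update s (pr.2.map (·.1))) PySem.Set.empty
  let included_llms : List String := PySem.Set.inter found_llms configured_llms
  let rejected_llms : List String := PySem.Set.diff found_llms configured_llms
  let filtered_evaluations : List (String × List (String × List (String × String))) :=
    detailed_evaluations.foldl (fun acc pr =>
      let filtered_model_results :=
        pr.2.foldl (fun k m => if PySem.Set.contains configured_llms m.1 then k ++ [m] else k) []
      if filtered_model_results.isEmpty then acc else acc ++ [(pr.1, filtered_model_results)]) []
  (filtered_evaluations,
   PySem.List.sorted included_llms (fun x => x) false,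
   PySem.List.sorted rejected_llms (fun x => x) false)

-- ===== PORT B =====
-- 'model_name in model_config' (dict key membership)
def pvKeyMem (model_config : List (String × List (String × String))) (n : String) : Bool :=
  model_config.any (fun kv => kv.1 == n)

-- literal transliteration of B: one pass, state = (filtered_evaluations, included, rejected)
def filter_llms_by_config_alt (detailed_evaluations : List (String × List (String × List (String × String)))) (model_config : List (String × List (String × String))) : (List (String × List (String × List (String × String)))) × List String × List String :=
  let st :=
    detailed_evaluations.foldl (fun st pr =>
      let inner :=
        pr.2.foldl (fun t m =>
          if pvKeyMem model_config m.1 then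
            (t.1 ++ [m], PySem.Set.add t.2.1 m.1, t.2.2)
          else
            (t.1, t.2.1, PySem.Set.add t.2.2 m.1))
          (([] : List (String × List (String × String))), st.2.1, st.2.2)
      (if inner.1.isEmpty then st.1 else st.1 ++ [(pr.1, inner.1)], inner.2.1, inner.2.2))
      (([] : List (String × List (String × List (String × String)))),
       (PySem.Set.empty : PySem.Set String), (PySem.Set.empty : PySem.Set String))
  (st.1,
   PySem.List.sorted st.2.1 (fun x => x) false,
   PySem.List.sorted st.2.2 (fun x => x) false)

-- ===== PRECONDITION & SPEC =====
def Spec_filter_llms_by_config (detailed_evaluations : List (String × List (String × List (String × String)))) (model_config : List (String × List (String × String))) (out : (List (String × List (String × List (String × String)))) × List String × List String) : Prop := out = filter_llms_by_config_alt detailed_evaluations model_config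
instance (detailed_evaluations : List (String × List (String × List (String × String)))) (model_config : List (String × List (String × String))) (out : (List (String × List (String × List (String × String)))) × List String × List String) : Decidable (Spec_filter_llms_by_config detailed_evaluations model_config out) := by
  unfold Spec_filter_llms_by_config
  exact @instDecidableEqProd _ _ (fun _ _ => inferInstance) (fun _ _ => inferInstance) _ _

-- ===== CLAIM (what is proved, stated in full; the proofs are below) =====
def Claim_equal_filter_llms_by_config : Prop := ∀ (detailed_evaluations : List (String × List (String × List (String × String)))) (model_config : List (String × List (String × String))), Dom_filter_llms_by_config detailed_evaluations model_config → Spec_filter_llms_by_config detailed_evaluations model_config (filter_llms_by_config detailed_evaluations model_config)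

-- ===== LEMMAS AND PROOFS =====

-- B's membership test equals A's set-of-configured-keys test
theorem pvKeyMem_eq (model_config : List (String × List (String × String))) (n : String) :
    pvKeyMem model_config n
      = PySem.Set.contains (PySem.Set.ofList (model_config.map (·.1))) n := by
  have h1 : pvKeyMem model_config n = true ↔ n ∈ model_config.map (·.1) := by
    simp only [pvKeyMem, List.any_eq_true, List.mem_map, beq_iff_eq]
  have h2 : PySem.Set.contains (PySem.Set.ofList (model_config.map (·.1))) n = true
      ↔ n ∈ model_config.map (·.1) := by
    rw [PySem.Set.contains_iff, PySem.Set.mem_ofList]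
  rw [Bool.eq_iff_iff, h1, h2]

-- filtering a set after adding one element
theorem filter_add (p : String → Bool) (s : PySem.Set String) (n : String) :
    (PySem.Set.add s n).filter p
      = if p n then PySem.Set.add (s.filter p) n else s.filter p := by
  by_cases hm : n ∈ s
  · rw [PySem.Set.add_of_mem hm]
    by_cases hp : p n = true
    · have : n ∈ s.filter p := List.mem_filter.2 ⟨hm, hp⟩
      rw [if_pos hp, PySem.Set.add_of_mem this]
    · rw [if_neg hp]
  · rw [PySem.Set.add_of_not_mem hm, List.filter_append]
    by_cases hp : p n = true
    · have : n ∉ s.filter p := fun h => hm (List.mem_filter.1 h).1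
      rw [if_pos hp, PySem.Set.add_of_not_mem this]
      simp [hp]
    · simp [hp]

-- the running "add if p" loop maintains the filtered found-set
theorem foldl_add_filter (p : String → Bool) (l : List String) (found : PySem.Set String) :
    l.foldl (fun s n => if p n then PySem.Set.add s n else s) (found.filter p)
      = (l.foldl PySem.Set.add found).filter p := by
  induction l generalizing found with
  | nil => rfl
  | cons n t ih =>
    simp only [List.foldl_cons]
    rw [← filter_add p found n, ih]

-- B's triple-state inner loop is three independent loops
theorem inner_split (p : String → Bool) (l : List (String × List (String × String)))
    (k : List (String × List (String × String))) (i r : PySem.Set String) :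
    l.foldl (fun t m =>
        if p m.1 then (t.1 ++ [m], PySem.Set.add t.2.1 m.1, t.2.2)
        else (t.1, t.2.1, PySem.Set.add t.2.2 m.1)) (k, i, r)
      = (l.foldl (fun a m => if p m.1 then a ++ [m] else a) k,
         l.foldl (fun s m => if p m.1 then PySem.Set.add s m.1 else s) i,
         l.foldl (fun s m => if p m.1 then s else PySem.Set.add s m.1) r) := by
  induction l generalizing k i r with
  | nil => rfl
  | cons m t ih =>
    simp only [List.foldl_cons]
    by_cases hp : p m.1 = true <;> simp [hp, ih]

-- main invariant: B's single pass computes A's filtered list and the filtered found-set pair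
theorem main_fold (p : String → Bool)
    (evals : List (String × List (String × List (String × String))))
    (acc : List (String × List (String × List (String × String)))) (found : PySem.Set String) :
    evals.foldl (fun st pr =>
        let inner :=
          pr.2.foldl (fun t m =>
            if p m.1 then (t.1 ++ [m], PySem.Set.add t.2.1 m.1, t.2.2)
            else (t.1, t.2.1, PySem.Set.add t.2.2 m.1))
            (([] : List (String × List (String × String))), st.2.1, st.2.2)
        (if inner.1.isEmpty then st.1 else st.1 ++ [(pr.1, inner.1)], inner.2.1, inner.2.2))
      (acc, found.filter p, found.filter (fun n => !p n))
      = (evals.foldl (fun a pr =>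
            let fmr := pr.2.foldl (fun k m => if p m.1 then k ++ [m] else k) []
            if fmr.isEmpty then a else a ++ [(pr.1, fmr)]) acc,
         (evals.foldl (fun s pr => PySem.Set.update s (pr.2.map (·.1))) found).filter p,
         (evals.foldl (fun s pr => PySem.Set.update s (pr.2.map (·.1))) found).filter (fun n => !p n)) := by
  induction evals generalizing acc found with
  | nil => rfl
  | cons pr t ih =>
    simp only [List.foldl_cons]
    rw [inner_split]
    have hupd : PySem.Set.update found (pr.2.map (·.1)) = (pr.2.map (·.1)).foldl PySem.Set.add found := rfl
    have hinc : pr.2.foldl (fun s m => if p m.1 then PySem.Set.add s m.1 else s) (found.filter p)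
        = (PySem.Set.update found (pr.2.map (·.1))).filter p := by
      rw [hupd, ← foldl_add_filter p]
      simp only [List.foldl_map]
    have hrej : pr.2.foldl (fun s m => if p m.1 then s else PySem.Set.add s m.1) (found.filter (fun n => !p n))
        = (PySem.Set.update found (pr.2.map (·.1))).filter (fun n => !p n) := by
      rw [hupd, ← foldl_add_filter (fun n => !p n)]
      simp only [List.foldl_map]
      apply PySem.List.foldl_congr_mem
      intro acc x _
      by_cases hp : p x.1 = true <;> simp [hp]
    rw [hinc, hrej, ih]

-- ===== VERDICT (by name: the statement is the Claim_ definition above) =====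
theorem filter_llms_by_config_spec : Claim_equal_filter_llms_by_config := by
  intro de mc _
  unfold Spec_filter_llms_by_config filter_llms_by_config filter_llms_by_config_alt
  have hkm : (fun (m : String × List (String × String)) =>
      pvKeyMem mc m.1) = fun m => PySem.Set.contains (PySem.Set.ofList (mc.map (·.1))) m.1 := by
    funext m; exact pvKeyMem_eq mc m.1
  simp only [pvKeyMem_eq]
  have h := main_fold (fun n => PySem.Set.contains (PySem.Set.ofList (mc.map (·.1))) n) de [] PySem.Set.empty
  simp only [PySem.Set.empty, List.filter_nil] at h
  rw [show (PySem.Set.empty : PySem.Set String) = ([] : List String) from rfl, h]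
  rfl
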